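-- pv_equiv track=rewrite | github.com/wh2per/Programmers-Algorithm | Programmers/Lv3/Lv3_최고의집합.py | solution
-- ===== SOURCE A (Python) =====
-- def solution(n, s):
--     answer = []
--     if n>s:
--         answer.append(-1)
--     elif n==s:
--         for i in range(0,n):
--             answer.append(1)
--     else:
--         q = s//n
--         r = s%n
--         j = n-1
--         for i in range(n):
--             answer.append(q)
--         while r!=0:
--             answer[j] += 1
--             j -= 1
--             r -= 1
--     return answer
-- ===== SOURCE B (Python) =====
-- def solution(n, s):
--     if n > s:
--         return [-1]
--     out = []
--     while n > 0:
--         x = s // n          # greedy: floor of the average of what's left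
--         out.append(x)
--         s -= x
--         n -= 1
--     return out
-- ===== Notes on version B (the rewrite author's own statement) =====
-- stated objective: alternative
-- what changed: Replaces A's three-branch divmod scheme (fill the list with q, then a while loop that patches the last r entries in place) by a single per-element greedy loop that repeatedly emits s//n for the remaining budget and count, subtracting as it goes; the n==s branch disappears since the greedy loop yields [1]*n there.
import Mathlib
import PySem

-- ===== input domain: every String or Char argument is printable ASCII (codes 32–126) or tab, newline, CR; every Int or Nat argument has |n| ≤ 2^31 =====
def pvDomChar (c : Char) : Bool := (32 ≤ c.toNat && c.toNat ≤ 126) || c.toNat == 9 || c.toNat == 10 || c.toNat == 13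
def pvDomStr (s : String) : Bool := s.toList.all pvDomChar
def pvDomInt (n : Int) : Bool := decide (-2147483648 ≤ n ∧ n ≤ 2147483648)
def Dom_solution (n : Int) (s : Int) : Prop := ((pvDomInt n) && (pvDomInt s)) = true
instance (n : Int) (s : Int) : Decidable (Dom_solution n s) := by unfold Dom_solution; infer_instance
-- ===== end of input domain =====

-- B replaces A's fill-then-patch divmod scheme by a per-element greedy loop (objective: alternative).

-- ===== PORT A =====
-- `answer[j] += 1` (Python index assignment, negative j counts from the end; out of range = IndexError, excluded by Pre_)
def pyIncAt (ans : List Int) (j : Int) : List Int :=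
  let i : Int := if j < 0 then j + ans.length else j
  if 0 ≤ i ∧ i < ans.length then ans.set i.toNat (ans.getD i.toNat 0 + 1) else ans

-- the `while r != 0` loop; fuel = r.toNat (inside Pre_ the loop runs exactly r ≥ 0 times)
def solutionWhileA : List Int → Int → Nat → List Int
  | ans, _, 0 => ans
  | ans, j, Nat.succ k => solutionWhileA (pyIncAt ans j) (j - 1) k

def solution (n : Int) (s : Int) : List Int :=
  if n > s then [] ++ [-1]
  else if n = s then
    (PySem.List.pyRange 0 n 1).foldl (fun acc _ => acc ++ [(1 : Int)]) []
  else
    let q := PySem.Int.floordiv s n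
    let r := PySem.Int.mod s n
    let j := n - 1
    let answer := (PySem.List.pyRange 0 n 1).foldl (fun acc _ => acc ++ [q]) []
    solutionWhileA answer j r.toNat

-- ===== PORT B =====
-- the `while n > 0` greedy loop of Source B: emit s//n, subtract, decrement
def greedyB (n : Int) (s : Int) : List Int :=
  if 0 < n then
    let x := PySem.Int.floordiv s n
    x :: greedyB (n - 1) (s - x)
  else []
  termination_by n.toNat
  decreasing_by omega

def solution_alt (n : Int) (s : Int) : List Int :=
  if n > s then [-1] else greedyB n s

-- ===== PRECONDITION & SPEC =====
-- Pre_ excludes exactly the inputs where Python A raises: ZeroDivisionError (n = 0 < s)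
-- and IndexError (n < 0 < s - n with n not dividing s, where `answer` is empty).
def Pre_solution (n : Int) (s : Int) : Prop :=
  ¬ (n = 0 ∧ 0 < s) ∧ ¬ (n < 0 ∧ n < s ∧ ¬ (n ∣ s))
instance (n : Int) (s : Int) : Decidable (Pre_solution n s) := by unfold Pre_solution; infer_instance
def pvWitness_solution : Int × Int := (2, 5)

def Spec_solution (n : Int) (s : Int) (out : List Int) : Prop := out = solution_alt n s
instance (n : Int) (s : Int) (out : List Int) : Decidable (Spec_solution n s out) := by unfold Spec_solution; infer_instance

-- ===== CLAIM (what is proved, stated in full; the proofs are below) =====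
def Claim_equal_solution : Prop := ∀ (n : Int) (s : Int), Dom_solution n s → Pre_solution n s → Spec_solution n s (solution n s)

-- ===== LEMMAS AND PROOFS =====

lemma foldl_app_const (l : List Int) (init : List Int) (c : Int) :
    l.foldl (fun acc _ => acc ++ [c]) init = init ++ List.replicate l.length c := by
  induction l generalizing init with
  | nil => simp
  | cons x t ih => simp [List.foldl_cons, ih, List.replicate_succ]

lemma set_replicate_append (m : Nat) (t : List Int) (q x : Int) :
    (List.replicate (m + 1) q ++ t).set m x = List.replicate m q ++ x :: t := by
  induction m with
  | zero => simp
  | succ m ih => simp [List.replicate_succ] at ih ⊢; exact ih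

lemma getD_replicate_append (m : Nat) (t : List Int) (q : Int) :
    (List.replicate (m + 1) q ++ t).getD m 0 = q := by
  induction m with
  | zero => simp
  | succ m ih => simp [List.replicate_succ] at ih ⊢; exact ih

lemma whileA_replicate (k : Nat) : ∀ (a b : Nat) (q : Int),
    solutionWhileA (List.replicate (a + k) q ++ List.replicate b (q + 1)) ((a : Int) + k - 1) k
      = List.replicate a q ++ List.replicate (k + b) (q + 1) := by
  induction k with
  | zero => intro a b q; simp [solutionWhileA]
  | succ k ih =>
    intro a b q
    have hlen : (List.replicate (a + (k + 1)) q ++ List.replicate b (q + 1)).length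
        = a + k + 1 + b := by simp; omega
    have hj : ((a : Int) + (k + 1) - 1) = ((a + k : Nat) : Int) := by push_cast; ring
    have hset : pyIncAt (List.replicate (a + (k + 1)) q ++ List.replicate b (q + 1))
          ((a : Int) + (k + 1) - 1)
        = List.replicate (a + k) q ++ List.replicate (b + 1) (q + 1) := by
      unfold pyIncAt
      rw [hlen, hj]
      have hneg : ¬ ((a + k : Nat) : Int) < 0 := by omega
      simp only [hneg, if_false]
      have hc : (0 : Int) ≤ ((a + k : Nat) : Int) ∧ ((a + k : Nat) : Int) < (a + k + 1 + b : Nat) := by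
        constructor
        · omega
        · push_cast; omega
      rw [if_pos hc]
      have hrep : a + (k + 1) = (a + k) + 1 := by omega
      rw [hrep]
      rw [Int.toNat_natCast]
      rw [getD_replicate_append (a + k) (List.replicate b (q + 1)) q]
      rw [set_replicate_append (a + k) (List.replicate b (q + 1)) q (q + 1)]
      simp [List.replicate_succ]
    show solutionWhileA _ _ (k + 1) = _
    rw [solutionWhileA]
    push_cast
    rw [hset]
    have hj2 : ((a : Int) + (k + 1) - 1) - 1 = (a : Int) + k - 1 := by ring
    rw [hj2, ih a (b + 1) q]
    have hbk : k + (b + 1) = k + 1 + b := by omega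
    rw [hbk]

lemma floordiv_of_bounds (n q r : Int) (hn : 0 < n) (hr0 : 0 ≤ r) (hrn : r < n) :
    PySem.Int.floordiv (n * q + r) n = q := by
  rw [PySem.Int.floordiv_eq_iff_of_pos hn]
  constructor <;> nlinarith

lemma greedyB_nonpos (n s : Int) (h : ¬ 0 < n) : greedyB n s = [] := by
  rw [greedyB, if_neg h]

lemma greedy_closed : ∀ (k : Nat) (q r : Int), 0 ≤ r → r < (k : Int) →
    greedyB (k : Int) ((k : Int) * q + r)
      = List.replicate ((k : Int) - r).toNat q ++ List.replicate r.toNat (q + 1) := by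
  intro k
  induction k with
  | zero => intro q r h0 h1; omega
  | succ k ih =>
    intro q r h0 h1
    have hk1 : (0 : Int) < ((k + 1 : Nat) : Int) := by push_cast; omega
    rw [greedyB, if_pos hk1]
    have hx : PySem.Int.floordiv (((k + 1 : Nat) : Int) * q + r) ((k + 1 : Nat) : Int) = q :=
      floordiv_of_bounds _ q r hk1 h0 h1
    simp only [hx]
    have hrest : ((k + 1 : Nat) : Int) - 1 = (k : Int) := by push_cast; ring
    have hs : ((k + 1 : Nat) : Int) * q + r - q = (k : Int) * q + r := by push_cast; ring
    rw [hrest, hs]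
    by_cases hcase : r < (k : Int)
    · rw [ih q r h0 hcase]
      have h2 : (((k + 1 : Nat) : Int) - r).toNat = ((k : Int) - r).toNat + 1 := by
        push_cast; omega
      rw [h2, List.replicate_succ]
      simp
    · -- r = k
      have hrk : r = (k : Int) := by push_cast at h1; omega
      by_cases hk0 : 0 < k
      · have hs2 : (k : Int) * q + r = (k : Int) * (q + 1) + 0 := by rw [hrk]; ring
        rw [hs2, ih (q + 1) 0 le_rfl (by exact_mod_cast hk0)]
        have h2 : (((k + 1 : Nat) : Int) - r).toNat = 1 := by push_cast; omega
        have h3 : ((k : Int) - 0).toNat = k := by omega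
        have h4 : r.toNat = k := by omega
        rw [h2, h3, h4]
        simp [List.replicate_succ]
      · have hk : k = 0 := by omega
        subst hk
        rw [greedyB_nonpos _ _ (by omega)]
        have h2 : (((0 + 1 : Nat) : Int) - r).toNat = 1 := by push_cast; omega
        have h4 : r.toNat = 0 := by omega
        rw [h2, h4]
        simp

lemma solution_eq_alt (n s : Int) (hpre : Pre_solution n s) : solution n s = solution_alt n s := by
  obtain ⟨h0, hneg⟩ := hpre
  unfold solution solution_alt
  split_ifs with h1 h2
  · rfl
  · -- n = s: A gives [1]*n, B's greedy loop also yields [1]*n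
    subst h2
    rw [foldl_app_const, PySem.List.length_pyRange_one]
    simp only [List.nil_append, Int.sub_zero]
    by_cases hn : 0 < n
    · have : greedyB n (n * 1 + 0) =
          List.replicate (n - 0).toNat 1 ++ List.replicate (0 : Int).toNat 2 := by
        have hc := greedy_closed n.toNat 1 0 le_rfl (by omega)
        rwa [Int.toNat_of_nonneg (le_of_lt hn)] at hc
      simp only [mul_one, add_zero, Int.sub_zero] at this
      rw [this]
      simp
    · rw [greedyB_nonpos n n hn]
      have : n.toNat = 0 := by omega
      simp [this]
  · -- else branch: n < s, n ≠ 0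
    have hns : n < s := by omega
    have hn0 : n ≠ 0 := by
      intro h; subst h; exact h0 ⟨rfl, hns⟩
    simp only []
    set q := PySem.Int.floordiv s n with hq
    set r := PySem.Int.mod s n with hr
    rw [foldl_app_const, PySem.List.length_pyRange_one]
    simp only [List.nil_append, Int.sub_zero]
    rcases lt_or_gt_of_ne hn0 with hlt | hgt
    · -- n < 0 : Pre_ forces n ∣ s, hence r = 0; range(n) empty, greedy loop never runs
      have hdvd : n ∣ s := by
        by_contra hnd
        exact hneg ⟨hlt, hns, hnd⟩
      have hr0 : r = 0 := (PySem.Int.mod_eq_zero_iff_dvd s n).mpr hdvd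
      have hnt : n.toNat = 0 := by omega
      rw [hr0, greedyB_nonpos n s (by omega)]
      simp [hnt, solutionWhileA]
    · -- n > 0 : both sides equal [q]*(n-r) ++ [q+1]*r
      have hr0 : 0 ≤ r := PySem.Int.mod_nonneg s hgt
      have hrlt : r < n := PySem.Int.mod_lt s hgt
      -- A's side via the while-loop characterisation
      have ha : n.toNat = (n - r).toNat + r.toNat := by omega
      have hj : n - 1 = (((n - r).toNat : Nat) : Int) + (r.toNat : Int) - 1 := by
        omega
      rw [ha, hj]
      have hwa := whileA_replicate r.toNat (n - r).toNat 0 q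
      simp only [List.replicate_zero, List.append_nil, Nat.add_zero] at hwa
      rw [hwa]
      -- B's side via the greedy characterisation
      have hsdecomp : s = n * q + r := by
        have := PySem.Int.floordiv_mul_add_mod s n
        rw [← hq, ← hr] at this
        linarith [this]
      have hb := greedy_closed n.toNat q r hr0 (by omega)
      rw [Int.toNat_of_nonneg (le_of_lt hgt)] at hb
      rw [hsdecomp, hb]

-- ===== VERDICT (by name: the statement is the Claim_ definition above) =====
theorem solution_spec : Claim_equal_solution := by
  intro n s _ hpre
  exact solution_eq_alt n s hpre
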